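-- pv_equiv track=rewrite | github.com/adrian-dybwad/DGTCentaurMods | DGTCentaurMods/opt/DGTCentaurMods/tools/clients/millennium_client.py | odd_parity
-- ===== SOURCE A (Python) =====
-- def odd_parity(b: int) -> int:
--     """Calculate odd parity for a byte and set MSB if needed.
--
--     Args:
--         b: Byte value (0-127)
--
--     Returns:
--         Byte with odd parity (MSB set if needed)
--     """
--     byte = b & 127
--     par = 1
--     for _ in range(7):
--         bit = byte & 1
--         byte = byte >> 1
--         par = par ^ bit
--     if par == 1:
--         byte = b | 128
--     else:
--         byte = b & 127
--     return byte
-- ===== SOURCE B (Python) =====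
-- def odd_parity(b: int) -> int:
--     ones = bin(b & 127).count("1")
--     return b | 128 if ones % 2 == 0 else b & 127
-- ===== Notes on version B (the rewrite author's own statement) =====
-- stated objective: simpler
-- what changed: Replaces the seven-step shift-and-XOR loop with a direct popcount of the masked low bits via bin(...).count, deciding the parity bit in one line.
import Mathlib
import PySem

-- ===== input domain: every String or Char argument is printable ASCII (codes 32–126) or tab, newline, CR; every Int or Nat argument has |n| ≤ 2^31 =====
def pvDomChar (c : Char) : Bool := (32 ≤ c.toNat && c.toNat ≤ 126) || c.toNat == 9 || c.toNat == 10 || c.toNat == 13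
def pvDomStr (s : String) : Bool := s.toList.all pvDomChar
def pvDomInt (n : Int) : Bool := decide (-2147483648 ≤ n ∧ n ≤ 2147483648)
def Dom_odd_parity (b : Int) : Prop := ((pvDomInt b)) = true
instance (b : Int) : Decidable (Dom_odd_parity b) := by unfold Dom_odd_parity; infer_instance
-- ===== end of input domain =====

-- B replaces A's 7-step shift-and-XOR loop by a direct popcount of the low 7 bits (simpler, closed form).

-- ===== PORT A =====
-- literal port of A: 7-iteration loop carrying (byte, par), then branch on par == 1
def odd_parity (b : Int) : Int :=
  let byte := PySem.Int.band b 127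
  let s := (PySem.List.pyRange 0 7 1).foldl
    (fun (st : Int × Int) _ =>
      let bit := PySem.Int.band st.1 1
      let byte := st.1 >>> (1 : Nat)
      let par := PySem.Int.bxor st.2 bit
      (byte, par)) (byte, 1)
  if s.2 = 1 then PySem.Int.bor b 128 else PySem.Int.band b 127

-- ===== PORT B =====
-- port of B: bin(b & 127).count('1') = count of '1' among the base-2 digits of (b & 127)
def odd_parity_alt (b : Int) : Int :=
  let ones : Nat := (Nat.toDigits 2 (PySem.Int.band b 127).toNat).count '1'
  if ones % 2 = 0 then PySem.Int.bor b 128 else PySem.Int.band b 127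

-- ===== PRECONDITION & SPEC =====
def Spec_odd_parity (b : Int) (out : Int) : Prop := out = odd_parity_alt b
instance (b : Int) (out : Int) : Decidable (Spec_odd_parity b out) := by unfold Spec_odd_parity; infer_instance

-- ===== CLAIM (what is proved, stated in full; the proofs are below) =====
def Claim_equal_odd_parity : Prop := ∀ (b : Int), Dom_odd_parity b → Spec_odd_parity b (odd_parity b)

-- ===== LEMMAS AND PROOFS =====

-- the low-7-bit mask yields a value in [0, 128)
theorem band127_bounds (b : Int) : 0 ≤ PySem.Int.band b 127 ∧ PySem.Int.band b 127 < 128 := by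
  have h127 : ((127 : Int)).toNat = 127 := rfl
  unfold PySem.Int.band
  split_ifs with h1 h2 h2
  · have h := Nat.and_le_right (n := b.toNat) (m := (127 : Int).toNat)
    omega
  · exact absurd (by norm_num) h2
  · have h : (127 : Int).toNat - ((127 : Int).toNat &&& (-b - 1).toNat) ≤ (127 : Int).toNat :=
      Nat.sub_le _ _
    omega
  · exact absurd (by norm_num) h2

-- A's loop parity equals 1 exactly when the popcount of m (0 ≤ m < 128) is even
set_option maxRecDepth 100000 in
theorem cond_eq (m : Int) (h0 : 0 ≤ m) (h1 : m < 128) :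
    ((((PySem.List.pyRange 0 7 1).foldl
      (fun (st : Int × Int) _ =>
        (st.1 >>> (1 : Nat), PySem.Int.bxor st.2 (PySem.Int.band st.1 1))) (m, 1)).2 = 1)
    ↔ ((Nat.toDigits 2 m.toNat).count '1') % 2 = 0) := by
  have hfin : ∀ n : Fin 128,
      ((((PySem.List.pyRange 0 7 1).foldl
        (fun (st : Int × Int) _ =>
          (st.1 >>> (1 : Nat), PySem.Int.bxor st.2 (PySem.Int.band st.1 1))) ((n : Int), 1)).2 = 1)
      ↔ ((Nat.toDigits 2 ((n : Int)).toNat).count '1') % 2 = 0) := by decide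
  have hm : m = ((⟨m.toNat, by omega⟩ : Fin 128) : Int) := by simp; omega
  rw [hm]
  exact hfin _

-- ===== VERDICT (by name: the statement is the Claim_ definition above) =====
theorem odd_parity_spec : Claim_equal_odd_parity := by
  intro b _
  unfold Spec_odd_parity odd_parity odd_parity_alt
  obtain ⟨h0, h1⟩ := band127_bounds b
  have h := cond_eq (PySem.Int.band b 127) h0 h1
  simp only []
  by_cases hc : ((Nat.toDigits 2 (PySem.Int.band b 127).toNat).count '1') % 2 = 0
  · rw [if_pos (h.mpr hc), if_pos hc]
  · rw [if_neg (fun hp => hc (h.mp hp)), if_neg hc]
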